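-- pv_equiv track=rewrite | github.com/galaxy821/Algorithm | Implementation/pg/pg_72136.py | solution
-- ===== SOURCE A (Python) =====
-- def solution(input_string):
--     answer = ''
--
--     dic = {input_string[0]: 1}
--
--     for i in range(1, len(input_string)):
--         if input_string[i-1] != input_string[i]:
--             dic[input_string[i]] = dic.get(input_string[i], 0) + 1
--
--     for key, value in dic.items():
--         if value >= 2:
--             answer += key
--
--     if len(answer) == 0:
--         return 'N'
--     else:
--         return ''.join(sorted(list(answer)))
-- ===== SOURCE B (Python) =====
-- def solution(input_string):
--     # A character belongs to >=2 runs iff its occurrences are not one contiguous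
--     # block, i.e. the span from first to last occurrence exceeds its count.
--     answer = ''.join(sorted(c for c in set(input_string)
--                             if input_string.rfind(c) - input_string.find(c) + 1
--                                > input_string.count(c)))
--     return answer if answer else 'N'
-- ===== Notes on version B (the rewrite author's own statement) =====
-- stated objective: simpler
-- what changed: A counts run-starts in a dict while index-scanning the string with i-1/i comparisons; B never detects runs at all: per distinct character it tests whether the occurrences fail to be one contiguous block via rfind(c) - find(c) + 1 > count(c), which holds exactly when the character is split across >= 2 runs.
-- crash fix: On the empty string A raises IndexError at input_string[0]; B returns 'N'. — e.g. on solution(""): A raises IndexError, B returns "N"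
import Mathlib
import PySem

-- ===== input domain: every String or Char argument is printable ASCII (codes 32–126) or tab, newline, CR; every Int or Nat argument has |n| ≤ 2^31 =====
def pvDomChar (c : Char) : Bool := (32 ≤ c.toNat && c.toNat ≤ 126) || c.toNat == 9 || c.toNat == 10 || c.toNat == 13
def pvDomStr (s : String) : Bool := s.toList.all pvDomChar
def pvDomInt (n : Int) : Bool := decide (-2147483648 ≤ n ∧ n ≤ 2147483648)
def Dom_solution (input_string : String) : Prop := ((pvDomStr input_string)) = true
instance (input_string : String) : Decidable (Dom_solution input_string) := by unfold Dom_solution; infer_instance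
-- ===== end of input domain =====

-- B drops A's run-collapsing dict count entirely: per distinct character it tests whether the
-- occurrences fail to be one contiguous block (rfind - find + 1 > count), which holds exactly when
-- the character spans >= 2 runs (simpler; a timing run measured B faster via C-level find/rfind/count scans vs A's Python-level loop); B returns 'N' where A raises IndexError on "".

-- ===== PORT A =====
def solution (input_string : String) : String :=
  match PySem.Str.pyGet? input_string 0 with
  | none => ""   -- input_string[0] raises IndexError on the empty string; excluded by Pre_solution
  | some c0 =>
    let cs := input_string.toList
    let dic : PySem.Dict Char Int := PySem.Dict.empty.insert c0 1
    let dic := (PySem.List.pyRange 1 (PySem.Str.len input_string) 1).foldl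
      (fun d i =>
        if PySem.List.pyGetD cs (i-1) ' ' ≠ PySem.List.pyGetD cs i ' '   -- both indices always in range here
        then d.insert (PySem.List.pyGetD cs i ' ') (d.getD (PySem.List.pyGetD cs i ' ') 0 + 1)
        else d) dic
    let answer : List Char := dic.items.foldl
      (fun a kv => if kv.2 ≥ 2 then a ++ [kv.1] else a) []
    if answer.length = 0 then "N"
    else String.ofList (PySem.List.sorted answer (fun x => x) false)

-- ===== PORT B =====
-- Python's s.find(c) / s.rfind(c) for a SINGLE character c: first / last index or -1.
-- PySem has no rfind, so both are ported by hand; exact for one-character needles.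
def pyFindChar (cs : List Char) (c : Char) : Int :=
  if c ∈ cs then (cs.idxOf c : Int) else -1
def pyRFindChar (cs : List Char) (c : Char) : Int :=
  if c ∈ cs then ((cs.length : Int) - 1 - (cs.reverse.idxOf c : Int)) else -1

def solution_alt (input_string : String) : String :=
  let cs := input_string.toList
  -- s.count(c) for a single character c is the character count (exact: no overlap possible)
  let answer := String.ofList (PySem.List.sorted
    ((PySem.Set.ofList cs).filter
      (fun c => decide (pyRFindChar cs c - pyFindChar cs c + 1 > (PySem.List.count cs c : Int))))
    (fun x => x) false)
  if answer ≠ "" then answer else "N"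

-- ===== PRECONDITION & SPEC =====
-- Pre_ excludes only the empty string, on which A raises IndexError at input_string[0].
def Pre_solution (input_string : String) : Prop := input_string ≠ ""
instance (input_string : String) : Decidable (Pre_solution input_string) := by unfold Pre_solution; infer_instance
def pvWitness_solution : String := "abab"

-- A raises IndexError on the empty string; B returns 'N' there (no character repeats).
def Raises_solution (input_string : String) : Prop := input_string = ""
instance (input_string : String) : Decidable (Raises_solution input_string) := by unfold Raises_solution; infer_instance
def pvRaiseWitness_solution : String := ""
def pvRaiseWitnessOut_solution : String := "N"

def Spec_solution (input_string : String) (out : String) : Prop := out = solution_alt input_string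
instance (input_string : String) (out : String) : Decidable (Spec_solution input_string out) := by unfold Spec_solution; infer_instance

-- ===== CLAIM (what is proved, stated in full; the proofs are below) =====
def Claim_equal_solution : Prop := ∀ (input_string : String), Dom_solution input_string → Pre_solution input_string → Spec_solution input_string (solution input_string)
def Claim_raises_solution : Prop := (∀ (input_string : String), Dom_solution input_string → Raises_solution input_string → ¬ Pre_solution input_string) ∧ (Dom_solution (pvRaiseWitness_solution) ∧ Raises_solution (pvRaiseWitness_solution) ∧ solution_alt (pvRaiseWitness_solution) = pvRaiseWitnessOut_solution)

-- ===== LEMMAS AND PROOFS =====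

-- the run-collapsed tail of the string, as A's loop produces it (proof device only)
def pvDiffsFrom : Char → List Char → List Char
  | _, [] => []
  | prev, b :: t => (if prev ≠ b then [b] else []) ++ pvDiffsFrom b t

-- A's index loop performs exactly the collapse-and-count over pvDiffsFrom
theorem pv_A_loop (t : List Char) : ∀ (a : Char) (d : PySem.Dict Char Int),
    (List.range ((a :: t).length - 1)).foldl
      (fun d k =>
        if (a :: t).getD k ' ' ≠ (a :: t).getD (k+1) ' '
        then d.insert ((a :: t).getD (k+1) ' ') (d.getD ((a :: t).getD (k+1) ' ') 0 + 1)
        else d) d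
    = (pvDiffsFrom a t).foldl (fun d c => d.insert c (d.getD c 0 + 1)) d := by
  induction t with
  | nil => intro a d; simp [pvDiffsFrom]
  | cons b t ih =>
    intro a d
    rw [show ((a :: b :: t).length - 1) = ((b :: t).length - 1) + 1 by simp,
        List.range_succ_eq_map]
    have h := ih b (if a ≠ b then d.insert b (d.getD b 0 + 1) else d)
    simp only [List.getD_cons_succ] at h ⊢
    simp only [List.foldl_cons, List.foldl_map, List.getD_cons_zero, List.getD_cons_succ,
      pvDiffsFrom]
    rw [h]
    by_cases hab : a ≠ b
    · simp [hab]
    · simp [hab]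

-- number of run-starts of c in t when the preceding character is prev
def pvCnt (c prev : Char) (t : List Char) : Nat := (pvDiffsFrom prev t).count c

theorem pvCnt_cons (c p b : Char) (t : List Char) :
    pvCnt c p (b :: t) = (if b = c ∧ p ≠ c then 1 else 0) + pvCnt c b t := by
  by_cases hbc : b = c
  · subst hbc
    by_cases hpb : p = b <;> simp [pvCnt, pvDiffsFrom, hpb, Nat.add_comm]
  · by_cases hpb : p = b <;>
      simp [pvCnt, pvDiffsFrom, hpb, hbc]

-- pvCnt depends on the previous character only through "is it c"
theorem pvCnt_congr (c : Char) (t : List Char) : ∀ (p q : Char), (p = c ↔ q = c) →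
    pvCnt c p t = pvCnt c q t := by
  induction t with
  | nil => intro p q _; rfl
  | cons b t _ =>
    intro p q h
    rw [pvCnt_cons, pvCnt_cons]
    by_cases hb : b = c
    · by_cases hp : p = c
      · simp [hb, hp, h.mp hp]
      · have hq : ¬ q = c := fun hq => hp (h.mpr hq)
        simp [hb, hp, hq]
    · simp [hb]

theorem pvCnt_zero (c : Char) (t : List Char) (ht : c ∉ t) : ∀ p, pvCnt c p t = 0 := by
  induction t with
  | nil => intro p; rfl
  | cons b t ih =>
    intro p
    rw [pvCnt_cons]
    have hb : b ≠ c := fun h => ht (h ▸ List.mem_cons_self)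
    rw [if_neg (fun h => hb h.1), ih (fun h => ht (List.mem_cons_of_mem b h)) b]

theorem pvCnt_skip (c : Char) (u v : List Char) (hu : c ∉ u) : ∀ p, p ≠ c →
    pvCnt c p (u ++ v) = pvCnt c p v := by
  induction u with
  | nil => intro p _; rfl
  | cons a u ih =>
    intro p hp
    have ha : a ≠ c := fun h => hu (h ▸ List.mem_cons_self)
    rw [List.cons_append, pvCnt_cons, if_neg (fun h => ha h.1),
        ih (fun h => hu (List.mem_cons_of_mem a h)) a ha, Nat.zero_add,
        pvCnt_congr c v a p (by simp [ha, hp])]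

theorem pvCnt_allc (c : Char) (m v : List Char) (hm : ∀ e ∈ m, e = c) :
    pvCnt c c (m ++ v) = pvCnt c c v := by
  induction m with
  | nil => rfl
  | cons b m ih =>
    have hb : b = c := hm b List.mem_cons_self
    subst hb
    rw [List.cons_append, pvCnt_cons, if_neg (fun h => h.2 rfl), Nat.zero_add,
        ih (fun e he => hm e (List.mem_cons_of_mem b he))]

theorem pvCnt_pos (c : Char) (w : List Char) : ∀ (xs : List Char) (p : Char), p ≠ c →
    1 ≤ pvCnt c p (xs ++ c :: w) := by
  intro xs
  induction xs with
  | nil =>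
    intro p hp
    rw [List.nil_append, pvCnt_cons, if_pos ⟨rfl, hp⟩]
    omega
  | cons e xs ih =>
    intro p hp
    rw [List.cons_append, pvCnt_cons]
    by_cases he : e = c
    · subst he
      rw [if_pos ⟨rfl, hp⟩]; omega
    · rw [if_neg (fun h => he h.1), Nat.zero_add]
      exact ih e he

theorem pv_mid (c : Char) (m w : List Char) (hw : c ∉ w) :
    1 ≤ pvCnt c c (m ++ c :: w) ↔ ∃ e ∈ m, e ≠ c := by
  constructor
  · intro h1
    by_contra hno
    push_neg at hno
    rw [pvCnt_allc c m (c :: w) hno, pvCnt_cons, if_neg (fun h => h.2 rfl),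
        Nat.zero_add, pvCnt_zero c w hw c] at h1
    omega
  · intro ⟨e, he, hec⟩
    clear hw
    induction m with
    | nil => cases he
    | cons b m ih =>
      rw [List.cons_append, pvCnt_cons]
      by_cases hb : b = c
      · subst hb
        have he' : e ∈ m := by
          rcases List.mem_cons.mp he with h | h
          · exact absurd h hec
          · exact h
        have := ih he'
        omega
      · rw [if_neg (fun h => hb h.1), Nat.zero_add]
        exact pvCnt_pos c w m b hb

-- first-occurrence split
theorem pv_split_first (c : Char) (l : List Char) (h : c ∈ l) :
    ∃ u t, l = u ++ c :: t ∧ c ∉ u := by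
  induction l with
  | nil => cases h
  | cons a l ih =>
    by_cases hac : a = c
    · exact ⟨[], l, by simp [hac], List.not_mem_nil⟩
    · have hl : c ∈ l := by
        rcases List.mem_cons.mp h with h' | h'
        · exact absurd h'.symm hac
        · exact h'
      obtain ⟨u, t, rfl, hu⟩ := ih hl
      refine ⟨a :: u, t, rfl, ?_⟩
      intro hmem
      rcases List.mem_cons.mp hmem with h' | h'
      · exact hac h'.symm
      · exact hu h'

-- last-occurrence split
theorem pv_split_last (c : Char) (l : List Char) (h : c ∈ l) :
    ∃ m w, l = m ++ c :: w ∧ c ∉ w := by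
  obtain ⟨u, t, he, hu⟩ := pv_split_first c l.reverse (List.mem_reverse.mpr h)
  refine ⟨t.reverse, u.reverse, ?_, by simpa using hu⟩
  have := congrArg List.reverse he
  simpa using this

-- ≥2 run-starts  ↔  the occurrences of c are not one contiguous block (B's span test)
theorem pv_key (cs : List Char) (c d : Char) (hd : d ≠ c) (hc : c ∈ cs) :
    2 ≤ pvCnt c d cs ↔
      pyRFindChar cs c - pyFindChar cs c + 1 > (cs.count c : Int) := by
  obtain ⟨u, t, rfl, hu⟩ := pv_split_first c cs hc
  by_cases hxt : c ∈ t
  · obtain ⟨m, w, rfl, hw⟩ := pv_split_last c t hxt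
    have hcnt : pvCnt c d (u ++ c :: (m ++ c :: w)) = 1 + pvCnt c c (m ++ c :: w) := by
      rw [pvCnt_skip c u (c :: (m ++ c :: w)) hu d hd, pvCnt_cons, if_pos ⟨rfl, hd⟩]
    have hfind : pyFindChar (u ++ c :: (m ++ c :: w)) c = (u.length : Int) := by
      rw [pyFindChar, if_pos hc, List.idxOf_append_of_notMem hu, List.idxOf_cons_self]
      simp
    have hrev : (u ++ c :: (m ++ c :: w)).reverse
        = w.reverse ++ c :: (m.reverse ++ c :: u.reverse) := by
      simp
    have hrfind : pyRFindChar (u ++ c :: (m ++ c :: w)) c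
        = (u.length : Int) + m.length + 1 := by
      rw [pyRFindChar, if_pos hc, hrev,
          List.idxOf_append_of_notMem (by simpa using hw), List.idxOf_cons_self]
      simp
      push_cast
      ring
    have hcount : (u ++ c :: (m ++ c :: w)).count c = m.count c + 2 := by
      rw [List.count_append, List.count_cons, List.count_append, List.count_cons,
          List.count_eq_zero_of_not_mem hu, List.count_eq_zero_of_not_mem hw]
      simp
    have hm : m.count c < m.length ↔ ∃ e ∈ m, e ≠ c := by
      constructor
      · intro hlt
        by_contra hno
        push_neg at hno
        rw [List.count_eq_length.mpr (fun b hb => (hno b hb).symm)] at hlt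
        omega
      · intro ⟨e, he, hec⟩ 
        rcases Nat.lt_or_ge (m.count c) m.length with h | h
        · exact h
        · have := List.count_le_length (l := m) (a := c)
          have heq : m.count c = m.length := by omega
          exact absurd ((List.count_eq_length.mp heq) e he).symm hec
    rw [hcnt, hfind, hrfind, hcount]
    constructor
    · intro h
      have h1 : 1 ≤ pvCnt c c (m ++ c :: w) := by omega
      have := (pv_mid c m w hw).mp h1
      have hlt := hm.mpr this
      have hle : (m.count c : Int) < (m.length : Int) := by exact_mod_cast hlt
      omega
    · intro h
      have hlt : (m.count c : Int) < (m.length : Int) := by omega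
      have h2 : m.count c < m.length := by exact_mod_cast hlt
      have := (pv_mid c m w hw).mpr (hm.mp h2)
      omega
  · have hcnt : pvCnt c d (u ++ c :: t) = 1 := by
      rw [pvCnt_skip c u (c :: t) hu d hd, pvCnt_cons, if_pos ⟨rfl, hd⟩,
          pvCnt_zero c t hxt c]
    have hfind : pyFindChar (u ++ c :: t) c = (u.length : Int) := by
      rw [pyFindChar, if_pos hc, List.idxOf_append_of_notMem hu, List.idxOf_cons_self]
      simp
    have hrfind : pyRFindChar (u ++ c :: t) c = (u.length : Int) := by
      rw [pyRFindChar, if_pos hc, show (u ++ c :: t).reverse = t.reverse ++ c :: u.reverse by simp,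
          List.idxOf_append_of_notMem (by simpa using hxt), List.idxOf_cons_self]
      simp
      push_cast
      ring
    have hcount : (u ++ c :: t).count c = 1 := by
      rw [List.count_append, List.count_cons, List.count_eq_zero_of_not_mem hu,
          List.count_eq_zero_of_not_mem hxt]
      simp
    rw [hcnt, hfind, hrfind, hcount]
    constructor
    · intro h; omega
    · intro h; omega

-- collapsed characters come from the string
theorem pv_mem_diffs (x : Char) : ∀ (t : List Char) (p : Char), x ∈ pvDiffsFrom p t → x ∈ t := by
  intro t
  induction t with
  | nil => intro p h; cases h
  | cons b t ih =>
    intro p h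
    rw [pvDiffsFrom, List.mem_append] at h
    rcases h with h | h
    · by_cases hpb : p ≠ b
      · rw [if_pos hpb, List.mem_singleton] at h
        exact h ▸ List.mem_cons_self
      · rw [if_neg hpb] at h; cases h
    · exact List.mem_cons_of_mem b (ih b h)

-- the run list's count of x is pvCnt from any non-x previous character
theorem pv_runs_count (c0 : Char) (rest : List Char) (x d : Char) (hd : d ≠ x) :
    (c0 :: pvDiffsFrom c0 rest).count x = pvCnt x d (c0 :: rest) := by
  rw [pvCnt_cons, List.count_cons]
  have : (pvDiffsFrom c0 rest).count x = pvCnt x c0 rest := rfl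
  rw [this]
  by_cases h : c0 = x
  · simp [h, hd, Nat.add_comm]
  · simp [h, fun hh : x = c0 => h hh.symm]

-- a character distinct from x always exists
theorem pv_pick_d (x : Char) : ∃ d : Char, d ≠ x := by
  by_cases h : x = 'a'
  · exact ⟨'b', by subst h; decide⟩
  · exact ⟨'a', fun hh => h hh.symm⟩

theorem pv_ofList_ne_empty (l : List Char) (h : l ≠ []) : String.ofList l ≠ "" := by
  intro hc
  apply h
  have := congrArg String.toList hc
  simpa using this

theorem pv_main (s : String) (hp : s ≠ "") : solution s = solution_alt s := by
  have htl : s.toList ≠ [] := by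
    intro hc; apply hp
    have := congrArg String.ofList hc; simpa using this
  obtain ⟨c0, rest, hcs⟩ : ∃ c0 rest, s.toList = c0 :: rest := by
    cases h : s.toList with
    | nil => exact absurd h htl
    | cons a t => exact ⟨a, t, rfl⟩
  have hget : PySem.Str.pyGet? s 0 = some c0 := by
    simp [PySem.Str.pyGet?, hcs, PySem.List.pyGet?, PySem.List.pyIdx?]
  set runsL : List Char := c0 :: pvDiffsFrom c0 rest with hrunsL
  -- A side: the dict is Counter(runsL), the answer the keys with count ≥ 2
  have hA : solution s = (
    let dic := PySem.Dict.counter runsL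
    let answer : List Char := dic.items.foldl
      (fun a kv => if kv.2 ≥ 2 then a ++ [kv.1] else a) []
    if answer.length = 0 then "N"
    else String.ofList (PySem.List.sorted answer (fun x => x) false)) := by
    unfold solution
    rw [hget]
    simp only [hcs]
    have hlen : PySem.Str.len s = ((c0 :: rest).length : Int) := by
      simp [PySem.Str.len_eq, hcs]
    rw [hlen, PySem.List.pyRange_one]
    rw [List.foldl_map]
    have hfun : (fun (d : PySem.Dict Char Int) (k : Nat) =>
        if PySem.List.pyGetD (c0 :: rest) (1 + (k:Int) - 1) ' ' ≠ PySem.List.pyGetD (c0 :: rest) (1 + (k:Int)) ' '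
        then d.insert (PySem.List.pyGetD (c0 :: rest) (1 + (k:Int)) ' ')
            (d.getD (PySem.List.pyGetD (c0 :: rest) (1 + (k:Int)) ' ') 0 + 1)
        else d)
      = (fun (d : PySem.Dict Char Int) (k : Nat) =>
        if (c0 :: rest).getD k ' ' ≠ (c0 :: rest).getD (k+1) ' '
        then d.insert ((c0 :: rest).getD (k+1) ' ') (d.getD ((c0 :: rest).getD (k+1) ' ') 0 + 1)
        else d) := by
      funext d k
      rw [show (1 + (k:Int) - 1) = ((k:Nat) : Int) by ring,
          show (1 + (k:Int)) = (((k+1 : Nat)) : Int) by push_cast; ring,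
          PySem.List.pyGetD_natCast, PySem.List.pyGetD_natCast]
    rw [show (((c0 :: rest).length : Int) - 1).toNat = (c0 :: rest).length - 1 by simp]
    rw [hfun, pv_A_loop]
    have hseed : PySem.Dict.empty.insert c0 (1 : Int)
        = PySem.Dict.empty.insert c0 ((PySem.Dict.empty.getD c0 (0:Int)) + 1) := by
      simp [PySem.Dict.getD_empty]
    rw [hseed]
    rw [show (pvDiffsFrom c0 rest).foldl (fun d c => d.insert c (d.getD c 0 + 1))
          (PySem.Dict.empty.insert c0 ((PySem.Dict.empty.getD c0 (0:Int)) + 1))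
        = runsL.foldl (fun d c => d.insert c (d.getD c 0 + 1)) PySem.Dict.empty from rfl]
    rw [PySem.Dict.foldl_insert_getD_add_one_eq_counter]
  rw [hA]
  unfold solution_alt
  simp only
  set X : List Char := ((PySem.Dict.counter runsL).items.foldl
      (fun a kv => if kv.2 ≥ 2 then a ++ [kv.1] else a) ([] : List Char)) with hX
  set Y : List Char := (PySem.Set.ofList s.toList).filter
      (fun c => decide (pyRFindChar s.toList c - pyFindChar s.toList c + 1 > (PySem.List.count s.toList c : Int)))
    with hY
  have hXval : X = (PySem.Set.ofList runsL).filter (fun k => decide (2 ≤ (runsL.count k : Int))) := by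
    rw [hX]
    have hif : (fun (a : List Char) (kv : Char × Int) => if kv.2 ≥ 2 then a ++ [kv.1] else a)
        = (fun a kv => if (decide (2 ≤ kv.2)) = true then a ++ [kv.1] else a) := by
      funext a kv
      by_cases h : (2:Int) ≤ kv.2 <;> simp [h, ge_iff_le]
    rw [hif, PySem.List.foldl_append_if, PySem.Dict.items_counter]
    rw [List.filter_map, List.map_map]
    simp [Function.comp_def]
  have hXmem : ∀ x, x ∈ X ↔ x ∈ runsL ∧ 2 ≤ runsL.count x := by
    intro x
    rw [hXval]
    simp only [List.mem_filter, PySem.Set.mem_ofList, decide_eq_true_eq]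
    constructor
    · rintro ⟨h1, h2⟩; exact ⟨h1, by exact_mod_cast h2⟩
    · rintro ⟨h1, h2⟩; exact ⟨h1, by exact_mod_cast h2⟩
  have hYmem : ∀ x, x ∈ Y ↔ x ∈ s.toList ∧
      pyRFindChar s.toList x - pyFindChar s.toList x + 1 > (s.toList.count x : Int) := by
    intro x
    rw [hY]
    simp [List.mem_filter, PySem.Set.mem_ofList, PySem.List.count]
  have hbridge : ∀ x, (x ∈ runsL ∧ 2 ≤ runsL.count x) ↔
      (x ∈ s.toList ∧ pyRFindChar s.toList x - pyFindChar s.toList x + 1 > (s.toList.count x : Int)) := by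
    intro x
    obtain ⟨d, hd⟩ := pv_pick_d x
    have hrc : runsL.count x = pvCnt x d s.toList := by
      rw [show s.toList = c0 :: rest from hcs]
      exact pv_runs_count c0 rest x d hd
    constructor
    · rintro ⟨h1, h2⟩
      have hmem : x ∈ s.toList := by
        rw [show s.toList = c0 :: rest from hcs]
        rcases List.mem_cons.mp (hrunsL ▸ h1) with h | h
        · exact h ▸ List.mem_cons_self
        · exact List.mem_cons_of_mem c0 (pv_mem_diffs x rest c0 h)
      exact ⟨hmem, (pv_key s.toList x d hd hmem).mp (hrc ▸ h2)⟩
    · rintro ⟨h1, h2⟩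
      have h2' : 2 ≤ runsL.count x := hrc ▸ (pv_key s.toList x d hd h1).mpr h2
      exact ⟨List.count_pos_iff.mp (by omega), h2'⟩
  have hXnd : X.Nodup := by
    rw [hXval]; exact (PySem.Set.nodup_ofList runsL).filter _
  have hYnd : Y.Nodup := by
    rw [hY]; exact (PySem.Set.nodup_ofList s.toList).filter _
  have hperm : X.Perm Y := by
    refine (List.perm_ext_iff_of_nodup hXnd hYnd).mpr ?_
    intro a; rw [hXmem, hYmem]; exact hbridge a
  have hsorted : PySem.List.sorted X (fun x => x) false = PySem.List.sorted Y (fun x => x) false :=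
    PySem.List.sorted_eq_sorted_of_perm X Y (fun x => x) (fun a b h => h) hperm
  by_cases hemp : X = []
  · have hY0 : Y = [] := (hemp ▸ hperm.symm : Y.Perm []).eq_nil
    have hs0 : PySem.List.sorted Y (fun x => x) false = [] := by
      simp [hY0, PySem.List.sorted]
    rw [if_pos (by simp [hemp]), hs0]
    rw [if_neg (by simp)]
  · have hY0 : Y ≠ [] := fun h => hemp ((h ▸ hperm : X.Perm []).eq_nil)
    have hs0 : PySem.List.sorted Y (fun x => x) false ≠ [] := by
      intro h
      exact hY0 ((PySem.List.sorted_eq_nil_iff Y (fun x => x) false).mp h)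
    rw [if_neg (by simpa using hemp), if_pos (pv_ofList_ne_empty _ hs0), hsorted]

-- ===== VERDICT (by name: the statement is the Claim_ definition above) =====
theorem solution_spec : Claim_equal_solution := by
  intro s _ hp
  exact pv_main s hp

@[simp] theorem solution_raises : Claim_raises_solution := by
  unfold Claim_raises_solution
  exact ⟨fun s _ hr hp => hp hr, by decide⟩
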